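-- pv_equiv track=rewrite | github.com/garmourai/judex-web | cv_code/shot_segmentation_and_landing/coarse_rally.py | segment_coarse_rallies_by_frame_gap
-- ===== SOURCE A (Python) =====
-- from typing import Dict, List, Tuple, TypeVar
--
-- def segment_coarse_rallies_by_frame_gap(
--     sorted_frame_ids: List[int],
--     max_frame_gap: int,
-- ) -> List[Tuple[int, int]]:
--     """
--     Build contiguous frame ranges. When consecutive frames differ by more than
--     ``max_frame_gap``, start a new range.
--
--     Returns:
--         List of (start_frame_inclusive, end_frame_inclusive).
--     """
--     if not sorted_frame_ids:
--         return []
--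
--     out: List[Tuple[int, int]] = []
--     start = sorted_frame_ids[0]
--     prev = sorted_frame_ids[0]
--
--     for f in sorted_frame_ids[1:]:
--         if f - prev > max_frame_gap:
--             out.append((start, prev))
--             start = f
--         prev = f
--
--     out.append((start, prev))
--     return out
-- ===== SOURCE B (Python) =====
-- from typing import List, Tuple
--
-- def segment_coarse_rallies_by_frame_gap(
--     sorted_frame_ids: List[int],
--     max_frame_gap: int,
-- ) -> List[Tuple[int, int]]:
--     if not sorted_frame_ids:
--         return []
--     cut_pairs = [(a, b) for a, b in zip(sorted_frame_ids, sorted_frame_ids[1:])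
--                  if b - a > max_frame_gap]
--     starts = [sorted_frame_ids[0]] + [b for _, b in cut_pairs]
--     ends = [a for a, _ in cut_pairs] + [sorted_frame_ids[-1]]
--     return list(zip(starts, ends))
-- ===== Notes on version B (the rewrite author's own statement) =====
-- stated objective: alternative
-- what changed: Instead of threading (start, prev) state through one accumulating loop, B collects the gap-crossing consecutive pairs in one comprehension, derives the starts and ends lists from them, and zips them together.
import Mathlib
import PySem

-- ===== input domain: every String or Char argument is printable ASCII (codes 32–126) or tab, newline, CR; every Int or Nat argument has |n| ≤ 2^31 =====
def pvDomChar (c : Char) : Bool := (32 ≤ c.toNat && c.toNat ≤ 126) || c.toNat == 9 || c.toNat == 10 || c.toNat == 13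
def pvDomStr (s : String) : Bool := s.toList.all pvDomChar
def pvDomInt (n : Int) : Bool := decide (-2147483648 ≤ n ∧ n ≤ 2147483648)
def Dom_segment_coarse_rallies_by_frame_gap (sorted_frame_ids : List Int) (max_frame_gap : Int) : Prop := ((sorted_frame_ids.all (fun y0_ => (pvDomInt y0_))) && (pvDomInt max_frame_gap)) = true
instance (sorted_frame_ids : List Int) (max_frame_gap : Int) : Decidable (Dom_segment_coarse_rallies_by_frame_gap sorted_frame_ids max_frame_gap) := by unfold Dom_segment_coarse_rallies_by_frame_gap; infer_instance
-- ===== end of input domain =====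

-- B replaces A's single accumulating loop over (start, prev) state by collecting the
-- gap-crossing consecutive pairs, deriving the starts/ends lists from them and zipping
-- (objective: alternative decomposition, same O(n) cost).

-- ===== PORT A =====
def segment_coarse_rallies_by_frame_gap (sorted_frame_ids : List Int) (max_frame_gap : Int) : List (Int × Int) :=
  match sorted_frame_ids with
  | [] => []
  | x :: rest =>
    -- out = [], start = xs[0], prev = xs[0]; loop over xs[1:] (= rest)
    let st := rest.foldl
      (fun (s : List (Int × Int) × Int × Int) f =>
        if f - s.2.2 > max_frame_gap then (s.1 ++ [(s.2.1, s.2.2)], f, f)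
        else (s.1, s.2.1, f)) ([], x, x)
    st.1 ++ [(st.2.1, st.2.2)]

-- ===== PORT B =====
def segment_coarse_rallies_by_frame_gap_alt (sorted_frame_ids : List Int) (max_frame_gap : Int) : List (Int × Int) :=
  match sorted_frame_ids with
  | [] => []
  | x :: rest =>
    let cut_pairs := ((x :: rest).zip rest).filter (fun ab => decide (ab.2 - ab.1 > max_frame_gap))
    let starts := x :: cut_pairs.map Prod.snd
    let ends := cut_pairs.map Prod.fst ++ [(x :: rest).getLast (List.cons_ne_nil x rest)]
    starts.zip ends

-- ===== PRECONDITION & SPEC =====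
def Spec_segment_coarse_rallies_by_frame_gap (sorted_frame_ids : List Int) (max_frame_gap : Int) (out : List (Int × Int)) : Prop := out = segment_coarse_rallies_by_frame_gap_alt sorted_frame_ids max_frame_gap
instance (sorted_frame_ids : List Int) (max_frame_gap : Int) (out : List (Int × Int)) : Decidable (Spec_segment_coarse_rallies_by_frame_gap sorted_frame_ids max_frame_gap out) := by unfold Spec_segment_coarse_rallies_by_frame_gap; infer_instance

-- ===== CLAIM (what is proved, stated in full; the proofs are below) =====
def Claim_equal_segment_coarse_rallies_by_frame_gap : Prop := ∀ (sorted_frame_ids : List Int) (max_frame_gap : Int), Dom_segment_coarse_rallies_by_frame_gap sorted_frame_ids max_frame_gap → Spec_segment_coarse_rallies_by_frame_gap sorted_frame_ids max_frame_gap (segment_coarse_rallies_by_frame_gap sorted_frame_ids max_frame_gap)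

-- ===== LEMMAS AND PROOFS =====

-- A's loop, written as structural recursion on the remaining frames (proof helper).
def goA (g p s : Int) (l : List Int) : List (Int × Int) :=
  match l with
  | [] => [(s, p)]
  | f :: r => if f - p > g then (s, p) :: goA g f f r else goA g f s r

-- the gap-crossing pairs of p :: l
def cutsOf (g : Int) (ys : List Int) : List (Int × Int) :=
  (ys.zip ys.tail).filter (fun ab => decide (ab.2 - ab.1 > g))

theorem foldl_eq_goA (g : Int) (l : List Int) : ∀ (out : List (Int × Int)) (s p : Int),
    (let st := l.foldl
      (fun (st : List (Int × Int) × Int × Int) f =>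
        if f - st.2.2 > g then (st.1 ++ [(st.2.1, st.2.2)], f, f)
        else (st.1, st.2.1, f)) (out, s, p)
     st.1 ++ [(st.2.1, st.2.2)]) = out ++ goA g p s l := by
  induction l with
  | nil => intro out s p; simp [goA]
  | cons f r ih =>
    intro out s p
    simp only [List.foldl_cons, goA]
    by_cases h : f - p > g
    · simp only [if_pos h]
      rw [ih (out ++ [(s, p)]) f f]
      simp
    · simp only [if_neg h]
      exact ih out s f

theorem goA_eq_zip (g : Int) (l : List Int) : ∀ (p s : Int),
    goA g p s l =
      (s :: (cutsOf g (p :: l)).map Prod.snd).zip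
        ((cutsOf g (p :: l)).map Prod.fst ++ [(p :: l).getLast (List.cons_ne_nil p l)]) := by
  induction l with
  | nil => intro p s; simp [goA, cutsOf]
  | cons f r ih =>
    intro p s
    have hcut : cutsOf g (p :: f :: r) =
        if f - p > g then (p, f) :: cutsOf g (f :: r) else cutsOf g (f :: r) := by
      simp only [cutsOf, List.tail_cons, List.zip_cons_cons, List.filter_cons]
      by_cases h : f - p > g <;> simp [h]
    have hlast : (p :: f :: r).getLast (List.cons_ne_nil p (f :: r)) =
        (f :: r).getLast (List.cons_ne_nil f r) := List.getLast_cons _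
    by_cases h : f - p > g
    · simp only [goA, if_pos h, hcut, hlast]
      rw [ih f f]
      simp
    · simp only [goA, if_neg h, hcut, hlast]
      rw [ih f s]

-- ===== VERDICT (by name: the statement is the Claim_ definition above) =====
theorem segment_coarse_rallies_by_frame_gap_spec : Claim_equal_segment_coarse_rallies_by_frame_gap := by
  intro xs g _
  unfold Spec_segment_coarse_rallies_by_frame_gap
  cases xs with
  | nil => rfl
  | cons x rest =>
    show (let st := rest.foldl _ ([], x, x); st.1 ++ [(st.2.1, st.2.2)]) = _
    rw [foldl_eq_goA g rest [] x x, goA_eq_zip g rest x x]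
    simp [segment_coarse_rallies_by_frame_gap_alt, cutsOf]
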